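-- pv_equiv track=rewrite | github.com/Yujev/Python_HomeWork_3 | Python_Home_work_3_Zadacha_2.py | list2
-- ===== SOURCE A (Python) =====
-- def list2(k):   # Считаю произведение пар элементов
--     res = []
--     while len(k) > 1:
--         res.append(k[0] * k[-1])
--         del k[0]
--         del k[-1]
--     if len(k) == 1: res.append(k[0] ** 2)   # Возвожу серединный элемент в степень
--     return res
-- ===== SOURCE B (Python) =====
-- def list2(k):
--     n = len(k)
--     return [k[i] * k[n - 1 - i] for i in range((n + 1) // 2)]
-- ===== Notes on version B (the rewrite author's own statement) =====
-- stated objective: faster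
-- what changed: Replaces the destructive while-loop that repeatedly deletes the first and last element (each front deletion shifting the whole list) with a single O(n) index walk over the first half; note A empties its argument in place while B leaves it untouched (equivalence is about the return value).
import Mathlib
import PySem

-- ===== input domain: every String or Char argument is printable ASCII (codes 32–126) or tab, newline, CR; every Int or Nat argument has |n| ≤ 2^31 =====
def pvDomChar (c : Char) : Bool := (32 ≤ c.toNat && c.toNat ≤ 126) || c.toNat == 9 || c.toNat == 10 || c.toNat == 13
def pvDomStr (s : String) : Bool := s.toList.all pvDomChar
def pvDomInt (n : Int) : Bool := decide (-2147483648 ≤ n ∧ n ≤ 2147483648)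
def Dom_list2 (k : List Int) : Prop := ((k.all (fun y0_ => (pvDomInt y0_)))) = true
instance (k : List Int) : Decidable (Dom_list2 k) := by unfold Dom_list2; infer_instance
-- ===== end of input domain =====

-- B replaces A's O(n^2) destructive front/back deletion loop with a single O(n) index walk over
-- the first half; A empties its argument list in place, B does not mutate it — the equivalence
-- proved here is about the RETURN value only.

-- ===== PORT A =====
-- while len(k) > 1: res.append(k[0]*k[-1]); del k[0]; del k[-1]  (the two deletions make the
-- remaining list k.tail.dropLast); if len(k)==1: res.append(k[0]**2)
def list2 (k : List Int) : List Int :=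
  if h : 1 < k.length then
    (k.headI * k.getLastD 0) :: list2 (k.tail.dropLast)
  else if k.length = 1 then [k.headI ^ 2]
  else []
termination_by k.length
decreasing_by
  simp only [List.length_dropLast, List.length_tail]
  omega

-- ===== PORT B =====
-- [k[i] * k[n-1-i] for i in range((n+1)//2)]
def list2_alt (k : List Int) : List Int :=
  (List.range ((k.length + 1) / 2)).map
    (fun i => k.getD i 0 * k.getD (k.length - 1 - i) 0)

-- ===== PRECONDITION & SPEC =====
def Spec_list2 (k : List Int) (out : List Int) : Prop := out = list2_alt k
instance (k : List Int) (out : List Int) : Decidable (Spec_list2 k out) := by unfold Spec_list2; infer_instance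

-- ===== CLAIM (what is proved, stated in full; the proofs are below) =====
def Claim_equal_list2 : Prop := ∀ (k : List Int), Dom_list2 k → Spec_list2 k (list2 k)

-- ===== LEMMAS AND PROOFS =====

theorem list2_nil : list2 [] = [] := by
  unfold list2; simp

theorem list2_single (a : Int) : list2 [a] = [a ^ 2] := by
  unfold list2; simp

theorem list2_cons_concat (a b : Int) (l : List Int) :
    list2 (a :: (l ++ [b])) = a * b :: list2 l := by
  rw [list2]
  have h : (a :: (l ++ [b])).getLast?.getD 0 = b := by
    rw [← List.cons_append, List.getLast?_concat]; rfl
  simp [h]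

theorem list2_alt_nil : list2_alt [] = [] := by
  unfold list2_alt; simp

theorem list2_alt_single (a : Int) : list2_alt [a] = [a ^ 2] := by
  unfold list2_alt; simp [sq]

theorem list2_alt_cons_concat (a b : Int) (l : List Int) :
    list2_alt (a :: (l ++ [b])) = a * b :: list2_alt l := by
  unfold list2_alt
  have hlen : (a :: (l ++ [b])).length = l.length + 2 := by simp
  rw [hlen]
  have hdiv : (l.length + 2 + 1) / 2 = (l.length + 1) / 2 + 1 := by omega
  rw [hdiv, List.range_succ_eq_map, List.map_cons, List.map_map]
  congr 1
  · have : l.length + 2 - 1 - 0 = l.length + 1 := by omega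
    rw [this]
    simp [List.getD, List.getElem?_append_right (by omega : l.length ≤ l.length)]
  · apply List.map_congr_left
    intro i hi
    have hi' : i < (l.length + 1) / 2 := List.mem_range.mp hi
    have him : i < l.length := by omega
    simp only [Function.comp]
    have h1 : (a :: (l ++ [b])).getD (i + 1) 0 = l.getD i 0 := by
      simp [List.getD, List.getElem?_append_left him]
    have h2 : (a :: (l ++ [b])).getD (l.length + 2 - 1 - (i + 1)) 0
        = l.getD (l.length - 1 - i) 0 := by
      have he : l.length + 2 - 1 - (i + 1) = (l.length - 1 - i) + 1 := by omega
      have him2 : l.length - 1 - i < l.length := by omega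
      rw [he]
      simp [List.getD, List.getElem?_append_left him2]
    rw [h1, h2]

theorem list2_eq_alt (k : List Int) : list2 k = list2_alt k := by
  induction k using List.bidirectionalRec with
  | nil => rw [list2_nil, list2_alt_nil]
  | singleton a => rw [list2_single, list2_alt_single]
  | cons_append a l b ih =>
      rw [list2_cons_concat, list2_alt_cons_concat, ih]

-- ===== VERDICT (by name: the statement is the Claim_ definition above) =====
theorem list2_spec : Claim_equal_list2 := by
  intro k _
  exact list2_eq_alt k
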